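-- pv_equiv track=rewrite | github.com/crazyguitar/RLcade | rlcade/envs/__init__.py | get_world_stage_pairs
-- ===== SOURCE A (Python) =====
-- from typing import List, Optional, Tuple
--
-- SMB_TOTAL_WORLDS = 8
--
-- SMB_STAGES_PER_WORLD = 4
--
-- SMB_FIRST_WORLD = 1
--
-- SMB_FIRST_STAGE = 1
--
-- def get_world_stage_pairs(world: Optional[int], stage: Optional[int]) -> List[Tuple[int, int]]:
--     """Generate world/stage pairs based on selection criteria."""
--     if stage is not None and world is None:
--         raise ValueError("Cannot specify stage without world")
--
--     if world is not None and stage is not None: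
--         return [(world, stage)]
--     elif world is not None:
--         return [(world, s) for s in range(SMB_FIRST_STAGE, SMB_STAGES_PER_WORLD + 1)]
--     else:
--         return [
--             (w, s)
--             for w in range(SMB_FIRST_WORLD, SMB_TOTAL_WORLDS + 1)
--             for s in range(SMB_FIRST_STAGE, SMB_STAGES_PER_WORLD + 1)
--         ]
-- ===== SOURCE B (Python) =====
-- from typing import List, Optional, Tuple
--
-- SMB_TOTAL_WORLDS = 8
-- SMB_STAGES_PER_WORLD = 4
-- SMB_FIRST_WORLD = 1
-- SMB_FIRST_STAGE = 1
--
-- def get_world_stage_pairs(world: Optional[int], stage: Optional[int]) -> List[Tuple[int, int]]: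
--     """Generate world/stage pairs based on selection criteria."""
--     if stage is not None and world is None:
--         raise ValueError("Cannot specify stage without world")
--     w0 = world if world is not None else SMB_FIRST_WORLD
--     s0 = stage if stage is not None else SMB_FIRST_STAGE
--     nw = 1 if world is not None else SMB_TOTAL_WORLDS - SMB_FIRST_WORLD + 1
--     ns = 1 if stage is not None else SMB_STAGES_PER_WORLD - SMB_FIRST_STAGE + 1
--     return [(w0 + i // ns, s0 + i % ns) for i in range(nw * ns)]
-- ===== Notes on version B (the rewrite author's own statement) =====
-- stated objective: alternative
-- what changed: Replaces A's three shape-specific branches and nested comprehensions with a single flat loop over a linear index, recovering each pair by divmod on the stage count (w0 + i // ns, s0 + i % ns).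
import Mathlib
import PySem

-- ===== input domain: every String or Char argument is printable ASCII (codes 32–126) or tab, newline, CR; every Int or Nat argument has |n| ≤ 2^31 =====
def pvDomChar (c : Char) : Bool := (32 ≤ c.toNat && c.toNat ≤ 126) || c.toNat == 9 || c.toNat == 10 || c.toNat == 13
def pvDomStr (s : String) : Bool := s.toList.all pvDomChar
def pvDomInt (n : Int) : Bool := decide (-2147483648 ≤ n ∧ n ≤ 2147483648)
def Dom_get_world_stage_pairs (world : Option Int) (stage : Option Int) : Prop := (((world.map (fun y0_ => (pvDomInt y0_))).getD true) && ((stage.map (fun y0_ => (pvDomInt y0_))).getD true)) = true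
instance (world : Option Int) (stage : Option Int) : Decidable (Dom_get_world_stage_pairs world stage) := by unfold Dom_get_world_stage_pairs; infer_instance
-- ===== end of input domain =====

-- B enumerates the pairs by one flat loop over a linear index decoded with divmod, instead of A's three case-specific nested comprehensions (objective: alternative).

-- ===== PORT A =====
def SMB_TOTAL_WORLDS : Int := 8
def SMB_STAGES_PER_WORLD : Int := 4
def SMB_FIRST_WORLD : Int := 1
def SMB_FIRST_STAGE : Int := 1

def get_world_stage_pairs (world : Option Int) (stage : Option Int) : List (Int × Int) :=
  -- 'if stage is not None and world is None: raise ValueError(...)' — excluded by Pre_; [] stands for the raise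
  if stage.isSome && !world.isSome then []
  else match world, stage with
  | some w, some s => [(w, s)]
  | some w, none => (PySem.List.pyRange SMB_FIRST_STAGE (SMB_STAGES_PER_WORLD + 1) 1).map (fun s => (w, s))
  | none, _ =>
      (PySem.List.pyRange SMB_FIRST_WORLD (SMB_TOTAL_WORLDS + 1) 1).flatMap (fun w =>
        (PySem.List.pyRange SMB_FIRST_STAGE (SMB_STAGES_PER_WORLD + 1) 1).map (fun s => (w, s)))

-- ===== PORT B =====
def get_world_stage_pairs_alt (world : Option Int) (stage : Option Int) : List (Int × Int) :=
  -- guard 'stage without world' raises in Source B too; excluded by Pre_, [] stands for the raise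
  if stage.isSome && !world.isSome then []
  else
    let w0 := world.getD SMB_FIRST_WORLD
    let s0 := stage.getD SMB_FIRST_STAGE
    let nw : Int := if world.isSome then 1 else SMB_TOTAL_WORLDS - SMB_FIRST_WORLD + 1
    let ns : Int := if stage.isSome then 1 else SMB_STAGES_PER_WORLD - SMB_FIRST_STAGE + 1
    (PySem.List.pyRange 0 (nw * ns) 1).map
      (fun i => (w0 + PySem.Int.floordiv i ns, s0 + PySem.Int.mod i ns))

-- ===== PRECONDITION & SPEC =====
-- Pre_ excludes exactly the inputs where A (and B) raise ValueError: stage given without world.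
def Pre_get_world_stage_pairs (world : Option Int) (stage : Option Int) : Prop :=
  stage = none ∨ world ≠ none
instance (world : Option Int) (stage : Option Int) : Decidable (Pre_get_world_stage_pairs world stage) := by unfold Pre_get_world_stage_pairs; infer_instance
def pvWitness_get_world_stage_pairs : Option Int × Option Int := (some 1, some 2)

def Spec_get_world_stage_pairs (world : Option Int) (stage : Option Int) (out : List (Int × Int)) : Prop := out = get_world_stage_pairs_alt world stage
instance (world : Option Int) (stage : Option Int) (out : List (Int × Int)) : Decidable (Spec_get_world_stage_pairs world stage out) := by unfold Spec_get_world_stage_pairs; infer_instance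

-- ===== CLAIM (what is proved, stated in full; the proofs are below) =====
def Claim_equal_get_world_stage_pairs : Prop := ∀ (world : Option Int) (stage : Option Int), Dom_get_world_stage_pairs world stage → Pre_get_world_stage_pairs world stage → Spec_get_world_stage_pairs world stage (get_world_stage_pairs world stage)

-- ===== LEMMAS AND PROOFS =====

-- ===== VERDICT (by name: the statement is the Claim_ definition above) =====
theorem get_world_stage_pairs_spec : Claim_equal_get_world_stage_pairs := by
  intro world stage _ hpre
  unfold Spec_get_world_stage_pairs get_world_stage_pairs get_world_stage_pairs_alt
  match world, stage with
  | some w, some s =>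
      simp [SMB_FIRST_WORLD, SMB_FIRST_STAGE,
            show PySem.List.pyRange 0 1 1 = [0] from rfl]
  | some w, none =>
      simp only [SMB_FIRST_WORLD, SMB_FIRST_STAGE, SMB_STAGES_PER_WORLD, Option.isSome, Option.getD]
      norm_num [show PySem.List.pyRange 1 5 1 = [1,2,3,4] from rfl,
            show PySem.List.pyRange 0 4 1 = [0,1,2,3] from rfl,
            PySem.Int.floordiv, PySem.Int.mod]
      decide
  | none, none => decide
  | none, some s => simp [Pre_get_world_stage_pairs] at hpre
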